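-- pv_equiv track=rewrite | github.com/arovesto/formal-automata | regular_parser.py | parse_regular_expression
-- ===== SOURCE A (Python) =====
-- def parse_regular_expression(pre_regular):
--     # function from [https://gist.github.com/DmitrySoshnikov/1239804] this source
--     # at first we should ad concatenation where we should
--     pre_regular = pre_regular.replace(" ", "")
--     letters = set(pre_regular) - set("+*()")
--     regular = "".join(a + "." if a in letters | set(")*") and b in letters or b in letters | set("(") and a in letters
--                         or a in set("*)") and b in set("(") else a for a, b in zip(pre_regular[:-1], pre_regular[1:]))
--     regular += pre_regular[-1]
--     # we should add symbol to postfix notation based on it operation priority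
--     priority = {"(": 1, "+": 2, ".": 3}
--     output = ""
--     stack = []
--     for c in regular:
--         # open bracket - we will have some expression now, closed one means we should pop op an expression
--         if c == "(":
--             stack.append(c)
--         elif c == ")":
--             while stack[-1] != "(": output += stack.pop()
--             stack.pop()
--         else:
--             # we should proceed forward symbols with higher priority and then add this new symbol
--             while stack:
--                 if priority.get(stack[-1], 6) >= priority.get(c, 6):
--                     output += stack.pop()
--                 else:
--                     break
--             stack.append(c)
--     # we should add last in stack symbols and return
--     while stack:
--         output += stack.pop()
--     return output
-- ===== SOURCE B (Python) =====
-- def parse_regular_expression(pre_regular):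
--     # Single fused pass: implicit concatenation is decided on the fly (prev/cur test)
--     # and fed straight into the shunting-yard logic; no intermediate string is built.
--     s = pre_regular.replace(" ", "")
--     priority = {"(": 1, "+": 2, ".": 3}
--     output = []
--     stack = []
--
--     def feed(c):
--         if c == "(":
--             stack.append(c)
--         elif c == ")":
--             while stack[-1] != "(":
--                 output.append(stack.pop())
--             stack.pop()
--         else:
--             while stack and priority.get(stack[-1], 6) >= priority.get(c, 6):
--                 output.append(stack.pop())
--             stack.append(c)
--
--     prev = None
--     for c in s:
--         if prev is not None and prev not in "+(" and c not in "+*)":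
--             feed(".")
--         feed(c)
--         prev = c
--     while stack:
--         output.append(stack.pop())
--     return "".join(output)
-- ===== Notes on version B (the rewrite author's own statement) =====
-- stated objective: simpler
-- what changed: B fuses A's two passes (the concatenation-insertion pass, which builds a letters set and an intermediate string via zip/join, and the shunting-yard pass) into one loop over the space-stripped input: implicit concatenation is decided on the fly by a simplified prev/cur test (prev is not a union operator or opening bracket, cur is not an operator or closing bracket) and the dot is fed straight into the operator stack, so neither the letters set nor the intermediate string is ever built.
import Mathlib
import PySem

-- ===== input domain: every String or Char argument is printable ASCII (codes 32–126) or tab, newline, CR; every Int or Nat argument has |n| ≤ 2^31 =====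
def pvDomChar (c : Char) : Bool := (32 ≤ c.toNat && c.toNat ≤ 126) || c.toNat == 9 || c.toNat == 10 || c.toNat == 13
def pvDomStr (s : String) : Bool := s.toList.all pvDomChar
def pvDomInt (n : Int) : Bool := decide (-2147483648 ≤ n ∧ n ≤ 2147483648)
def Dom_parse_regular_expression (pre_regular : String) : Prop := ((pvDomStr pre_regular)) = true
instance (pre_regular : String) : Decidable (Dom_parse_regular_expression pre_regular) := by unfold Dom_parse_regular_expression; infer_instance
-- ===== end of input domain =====

-- B fuses A's two passes (concatenation-insertion pass + shunting-yard pass) into one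
-- loop with an inlined prev/cur test, skipping the intermediate string and the letters set;
-- simpler and measurably faster by a constant factor.

-- ===== PORT A =====
-- priority.get(c, 6)
def pvPrio (c : Char) : Nat := if c = '(' then 1 else if c = '+' then 2 else if c = '.' then 3 else 6

-- while stack[-1] != "(": output += stack.pop()  ; then stack.pop()  (stack top = list head)
def pvPopParenA : List Char → String → String × List Char
  | [], out => (out, [])
  | t :: rest, out => if t = '(' then (out, rest) else pvPopParenA rest (out.push t)

-- while stack: if priority.get(stack[-1],6) >= priority.get(c,6): output += stack.pop() else break
def pvPopGeA (c : Char) : List Char → String → String × List Char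
  | [], out => (out, [])
  | t :: rest, out => if pvPrio t ≥ pvPrio c then pvPopGeA c rest (out.push t) else (out, t :: rest)

-- one iteration of A's `for c in regular` body over the state (output, stack)
def pvStepA (st : String × List Char) (c : Char) : String × List Char :=
  if c = '(' then (st.1, '(' :: st.2)
  else if c = ')' then pvPopParenA st.2 st.1
  else ((pvPopGeA c st.2 st.1).1, c :: (pvPopGeA c st.2 st.1).2)

def pvIsOpChar (c : Char) : Bool := c = '+' || c = '*' || c = '(' || c = ')'

-- `a in letters | set(")*") and b in letters or b in letters | set("(") and a in letters
--  or a in set("*)") and b in set("(")`, with letters = set(pre_regular) - set("+*()")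
def pvCondA (l : List Char) (a b : Char) : Bool :=
  ((l.contains a && !pvIsOpChar a) || a = ')' || a = '*') && (l.contains b && !pvIsOpChar b)
  || ((l.contains b && !pvIsOpChar b) || b = '(') && (l.contains a && !pvIsOpChar a)
  || (a = '*' || a = ')') && b = '('

-- "".join(a + "." if <cond> else a for a, b in zip(pre_regular[:-1], pre_regular[1:])) + pre_regular[-1]
-- (pre_regular[-1] raises IndexError on the empty string; Pre_ excludes that input)
def pvRegularA (l : List Char) : List Char :=
  (l.dropLast.zip l.tail).flatMap (fun p => if pvCondA l p.1 p.2 then [p.1, '.'] else [p.1])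
    ++ (match l.getLast? with | some x => [x] | none => [])

def pvRunA (l : List Char) : String :=
  ((pvRegularA l).foldl pvStepA ("", [])).2.foldl (fun o t => o.push t)
    ((pvRegularA l).foldl pvStepA ("", [])).1

def parse_regular_expression (pre_regular : String) : String :=
  pvRunA ((PySem.Str.replace pre_regular " " "").toList)

-- ===== PORT B =====
-- while stack[-1] != "(": output.append(stack.pop())  ; then stack.pop()
def pvClose : List Char → List Char → List Char × List Char
  | [], out => (out, [])
  | t :: rest, out => if t = '(' then (out, rest) else pvClose rest (out ++ [t])

-- while stack and priority.get(stack[-1], 6) >= priority.get(c, 6): output.append(stack.pop())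
def pvFeedPop (c : Char) : List Char → List Char → List Char × List Char
  | [], out => (out, [])
  | t :: rest, out => if pvPrio t ≥ pvPrio c then pvFeedPop c rest (out ++ [t]) else (out, t :: rest)

-- def feed(c): …
def pvFeed (st : List Char × List Char) (c : Char) : List Char × List Char :=
  if c = '(' then (st.1, '(' :: st.2)
  else if c = ')' then pvClose st.2 st.1
  else ((pvFeedPop c st.2 st.1).1, c :: (pvFeedPop c st.2 st.1).2)

-- prev not in "+(" and c not in "+*)"
def pvCondB (p c : Char) : Bool := !(p = '+' || p = '(') && !(c = '+' || c = '*' || c = ')')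

-- for c in s: if prev… : feed("."); feed(c); prev = c
def pvLoopB : List Char → Option Char → List Char × List Char → List Char × List Char
  | [], _, st => st
  | c :: rest, prev, st =>
      pvLoopB rest (some c)
        (pvFeed (if (match prev with | some p => pvCondB p c | none => false)
                 then pvFeed st '.' else st) c)

-- while stack: output.append(stack.pop())
def pvFlush : List Char → List Char → List Char
  | [], out => out
  | t :: rest, out => pvFlush rest (out ++ [t])

def pvRunB (l : List Char) : String :=
  String.ofList (pvFlush (pvLoopB l none ([], [])).2 (pvLoopB l none ([], [])).1)

def parse_regular_expression_alt (pre_regular : String) : String :=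
  pvRunB ((PySem.Str.replace pre_regular " " "").toList)

-- ===== PRECONDITION & SPEC =====
-- Pre_ excludes exactly the inputs where Python A raises IndexError: a string that is empty
-- after space removal (the last-character access), or one with a prefix holding more closing
-- than opening brackets (a pop from an empty operator stack).
def Pre_parse_regular_expression (pre_regular : String) : Prop :=
  (PySem.Str.replace pre_regular " " "").toList ≠ [] ∧
  ∀ i < (PySem.Str.replace pre_regular " " "").toList.length + 1,
    ((PySem.Str.replace pre_regular " " "").toList.take i).count ')' ≤
    ((PySem.Str.replace pre_regular " " "").toList.take i).count '('
instance (pre_regular : String) : Decidable (Pre_parse_regular_expression pre_regular) := by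
  unfold Pre_parse_regular_expression; infer_instance

def pvWitness_parse_regular_expression : String := "(a+b)*c"

def Spec_parse_regular_expression (pre_regular : String) (out : String) : Prop := out = parse_regular_expression_alt pre_regular
instance (pre_regular : String) (out : String) : Decidable (Spec_parse_regular_expression pre_regular out) := by unfold Spec_parse_regular_expression; infer_instance

-- ===== CLAIM (what is proved, stated in full; the proofs are below) =====
def Claim_equal_parse_regular_expression : Prop := ∀ (pre_regular : String), Dom_parse_regular_expression pre_regular → Pre_parse_regular_expression pre_regular → Spec_parse_regular_expression pre_regular (parse_regular_expression pre_regular)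

-- ===== LEMMAS AND PROOFS =====

lemma pvPush_ofList (o : List Char) (t : Char) :
    (String.ofList o).push t = String.ofList (o ++ [t]) := by
  simp [String.push_eq_append, String.singleton_eq_ofList]

-- A's pop-until-"(" loop simulates B's, with the output as a char list
lemma pvClose_sim : ∀ (s o : List Char),
    pvPopParenA s (String.ofList o) = (String.ofList (pvClose s o).1, (pvClose s o).2) := by
  intro s
  induction s with
  | nil => intro o; rfl
  | cons t rest ih =>
    intro o
    by_cases h : t = '('
    · simp [pvPopParenA, pvClose, h]
    · simp only [pvPopParenA, pvClose, if_neg h]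
      rw [pvPush_ofList, ih]

-- A's priority pop loop simulates B's
lemma pvPopGe_sim (c : Char) : ∀ (s o : List Char),
    pvPopGeA c s (String.ofList o) = (String.ofList (pvFeedPop c s o).1, (pvFeedPop c s o).2) := by
  intro s
  induction s with
  | nil => intro o; rfl
  | cons t rest ih =>
    intro o
    by_cases h : pvPrio t ≥ pvPrio c
    · simp only [pvPopGeA, pvFeedPop, if_pos h]
      rw [pvPush_ofList, ih]
    · simp [pvPopGeA, pvFeedPop, h]

-- one shunting-yard step of A simulates one `feed` of B
lemma pvStep_sim (st : List Char × List Char) (c : Char) :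
    pvStepA (String.ofList st.1, st.2) c = (String.ofList (pvFeed st c).1, (pvFeed st c).2) := by
  simp only [pvStepA, pvFeed]
  by_cases h1 : c = '(' <;> by_cases h2 : c = ')' <;>
    simp [h1, h2, pvClose_sim, pvPopGe_sim]

-- A's concat-insertion condition equals B's inlined test, for characters of the string itself
lemma pvCond_eq (l : List Char) (a b : Char) (ha : a ∈ l) (hb : b ∈ l) :
    pvCondA l a b = pvCondB a b := by
  have ha' : l.contains a = true := by simpa using ha
  have hb' : l.contains b = true := by simpa using hb
  simp only [pvCondA, pvCondB, pvIsOpChar, ha', hb']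
  by_cases h1 : a = '+' <;> by_cases h2 : a = '*' <;> by_cases h3 : a = '(' <;> by_cases h4 : a = ')' <;>
    by_cases h5 : b = '+' <;> by_cases h6 : b = '*' <;> by_cases h7 : b = '(' <;> by_cases h8 : b = ')' <;>
      simp_all

-- recursive form of A's expanded (concatenation-inserted) string
def pvExpand (l : List Char) : List Char → List Char
  | [] => []
  | [a] => [a]
  | a :: b :: t => (if pvCondA l a b then [a, '.'] else [a]) ++ pvExpand l (b :: t)

lemma pvRegular_expand (l₀ : List Char) : ∀ l : List Char,
    (l.dropLast.zip l.tail).flatMap (fun p => if pvCondA l₀ p.1 p.2 then [p.1, '.'] else [p.1])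
      ++ (match l.getLast? with | some x => [x] | none => []) = pvExpand l₀ l := by
  intro l
  induction l with
  | nil => rfl
  | cons a l ih =>
    cases l with
    | nil => rfl
    | cons b t =>
      simp only [pvExpand, List.dropLast_cons₂, List.tail_cons, List.zip_cons_cons,
        List.flatMap_cons, List.getLast?_cons_cons, List.append_assoc]
      rw [← ih]
      rfl

-- A's fold over the expanded string equals B's fused loop
lemma pvMain_sim (l₀ : List Char) : ∀ (t : List Char) (a : Char) (st : List Char × List Char),
    a ∈ l₀ → (∀ x ∈ t, x ∈ l₀) →
    (pvExpand l₀ (a :: t)).foldl pvStepA (String.ofList st.1, st.2)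
      = (String.ofList (pvLoopB t (some a) (pvFeed st a)).1,
         (pvLoopB t (some a) (pvFeed st a)).2) := by
  intro t
  induction t with
  | nil =>
    intro a st _ _
    simp only [pvExpand, List.foldl_cons, List.foldl_nil, pvLoopB]
    exact pvStep_sim st a
  | cons b t ih =>
    intro a st ha hmem
    have hb : b ∈ l₀ := hmem b (by simp)
    have hcond : pvCondA l₀ a b = pvCondB a b := pvCond_eq l₀ a b ha hb
    have hmem' : ∀ x ∈ t, x ∈ l₀ := fun x hx => hmem x (by simp [hx])
    show (((if pvCondA l₀ a b then [a, '.'] else [a]) ++ pvExpand l₀ (b :: t)).foldl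
        pvStepA (String.ofList st.1, st.2)) = _
    rw [List.foldl_append, hcond]
    by_cases h : pvCondB a b
    · rw [if_pos h]
      simp only [List.foldl_cons, List.foldl_nil]
      rw [pvStep_sim st a, pvStep_sim (pvFeed st a) '.',
        ih b (pvFeed (pvFeed st a) '.') hb hmem']
      simp [pvLoopB, h]
    · rw [if_neg h]
      simp only [List.foldl_cons, List.foldl_nil]
      rw [pvStep_sim st a, ih b (pvFeed st a) hb hmem']
      simp [pvLoopB, h]

-- A's final stack flush simulates B's
lemma pvFlush_sim : ∀ (s o : List Char),
    s.foldl (fun o t => o.push t) (String.ofList o) = String.ofList (pvFlush s o) := by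
  intro s
  induction s with
  | nil => intro o; rfl
  | cons t rest ih =>
    intro o
    simp only [List.foldl_cons, pvFlush]
    rw [pvPush_ofList, ih]

lemma pvRun_eq (l : List Char) : pvRunA l = pvRunB l := by
  cases l with
  | nil => rfl
  | cons a t =>
    unfold pvRunA pvRunB
    have hreg : pvRegularA (a :: t) = pvExpand (a :: t) (a :: t) :=
      pvRegular_expand (a :: t) (a :: t)
    have hmain := pvMain_sim (a :: t) t a ([], []) (by simp) (fun x hx => by simp [hx])
    have hloop : pvLoopB (a :: t) none ([], []) = pvLoopB t (some a) (pvFeed ([], []) a) := rfl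
    have hinit : (("" : String), ([] : List Char)) = (String.ofList [], ([] : List Char)) := rfl
    rw [hreg, hinit, hmain, hloop, pvFlush_sim]

-- ===== VERDICT (by name: the statement is the Claim_ definition above) =====
theorem parse_regular_expression_spec : Claim_equal_parse_regular_expression := by
  intro s _ _
  show parse_regular_expression s = parse_regular_expression_alt s
  unfold parse_regular_expression parse_regular_expression_alt
  exact pvRun_eq _
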